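-- pv_equiv track=rewrite | github.com/mechatroner/sublime_rainbow_csv | rainbow_utils.py | get_field_by_line_position
-- ===== SOURCE A (Python) =====
-- def get_field_by_line_position(fields, query_pos):
--     if not len(fields):
--         return None
--     col_num = 0
--     cpos = len(fields[col_num]) + 1
--     while query_pos > cpos and col_num + 1 < len(fields):
--         col_num += 1
--         cpos = cpos + len(fields[col_num]) + 1
--     return col_num
-- ===== SOURCE B (Python) =====
-- def get_field_by_line_position(fields, query_pos):
--     if not fields:
--         return None
--     # prefix[i] = sum over j <= i of (len(fields[j]) + 1)
--     prefix = []
--     total = 0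
--     for f in fields:
--         total += len(f) + 1
--         prefix.append(total)
--     # binary search: smallest i with prefix[i] >= query_pos (bisect_left)
--     lo, hi = 0, len(prefix)
--     while lo < hi:
--         mid = (lo + hi) // 2
--         if prefix[mid] < query_pos:
--             lo = mid + 1
--         else:
--             hi = mid
--     return min(lo, len(fields) - 1)
-- ===== Notes on version B (the rewrite author's own statement) =====
-- stated objective: alternative
-- what changed: Replaces the linear accumulate-and-scan while-loop with a prefix-sum table plus a hand-written binary search (bisect_left) and a final clamp to the last field.
import Mathlib
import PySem

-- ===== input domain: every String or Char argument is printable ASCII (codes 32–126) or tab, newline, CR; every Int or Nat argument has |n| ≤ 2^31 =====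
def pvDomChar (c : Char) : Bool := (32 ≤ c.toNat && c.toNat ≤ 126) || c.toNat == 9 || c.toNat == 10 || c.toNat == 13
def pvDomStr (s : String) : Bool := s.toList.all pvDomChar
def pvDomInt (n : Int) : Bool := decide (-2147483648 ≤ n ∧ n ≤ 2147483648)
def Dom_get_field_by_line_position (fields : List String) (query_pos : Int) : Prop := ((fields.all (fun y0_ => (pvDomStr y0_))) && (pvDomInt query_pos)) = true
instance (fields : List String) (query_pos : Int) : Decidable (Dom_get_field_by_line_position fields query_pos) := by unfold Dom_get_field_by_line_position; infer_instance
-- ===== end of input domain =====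

-- B replaces A's linear accumulate-and-scan with a prefix-sum table plus binary search (alternative decomposition, not claimed faster).

-- ===== PORT A =====
-- A's while loop; fields[col_num+1] is always in range (guard col_num+1 < len), so getD "" is exact.
def pvLoopA (fields : List String) (query_pos : Int) (col_num : Nat) (cpos : Int) : Nat :=
  if query_pos > cpos ∧ col_num + 1 < fields.length then
    pvLoopA fields query_pos (col_num + 1) (cpos + PySem.Str.len (fields.getD (col_num + 1) "") + 1)
  else col_num
termination_by fields.length - col_num

def get_field_by_line_position (fields : List String) (query_pos : Int) : Option Int :=
  if fields.length = 0 then none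
  else some (pvLoopA fields query_pos 0 (PySem.Str.len (fields.getD 0 "") + 1))

-- ===== PORT B =====
-- the prefix list built by B's for-loop: prefix[i] = t + sum_{j ≤ i} (len(fields[j]) + 1)
def pvPrefix (fields : List String) (t : Int) : List Int :=
  match fields with
  | [] => []
  | f :: rest => (t + PySem.Str.len f + 1) :: pvPrefix rest (t + PySem.Str.len f + 1)

-- B's hand-written bisect_left loop; prefix[mid] always in range, so getD 0 is exact.
def pvBsearch (P : List Int) (q : Int) (lo hi : Nat) : Nat :=
  if _h : lo < hi then
    let mid := (lo + hi) / 2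
    if P.getD mid 0 < q then pvBsearch P q (mid + 1) hi else pvBsearch P q lo mid
  else lo
termination_by hi - lo
decreasing_by all_goals omega

def get_field_by_line_position_alt (fields : List String) (query_pos : Int) : Option Int :=
  if fields.isEmpty then none
  else
    let P := pvPrefix fields 0
    let lo := pvBsearch P query_pos 0 P.length
    some ((min lo (fields.length - 1) : Nat) : Int)

-- ===== PRECONDITION & SPEC =====
def Spec_get_field_by_line_position (fields : List String) (query_pos : Int) (out : Option Int) : Prop := out = get_field_by_line_position_alt fields query_pos
instance (fields : List String) (query_pos : Int) (out : Option Int) : Decidable (Spec_get_field_by_line_position fields query_pos out) := by unfold Spec_get_field_by_line_position; infer_instance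

-- ===== CLAIM (what is proved, stated in full; the proofs are below) =====
def Claim_equal_get_field_by_line_position : Prop := ∀ (fields : List String) (query_pos : Int), Dom_get_field_by_line_position fields query_pos → Spec_get_field_by_line_position fields query_pos (get_field_by_line_position fields query_pos)

-- ===== LEMMAS AND PROOFS =====

theorem pvPrefix_length (fs : List String) (t : Int) : (pvPrefix fs t).length = fs.length := by
  induction fs generalizing t with
  | nil => rfl
  | cons f rest ih => simp [pvPrefix, ih]

theorem pvPrefix_zero (fs : List String) (t : Int) (h : fs ≠ []) :
    (pvPrefix fs t).getD 0 0 = t + PySem.Str.len (fs.getD 0 "") + 1 := by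
  cases fs with
  | nil => exact absurd rfl h
  | cons f rest => simp [pvPrefix]

theorem pvPrefix_step (fs : List String) (t : Int) (i : Nat) (h : i + 1 < fs.length) :
    (pvPrefix fs t).getD (i + 1) 0
      = (pvPrefix fs t).getD i 0 + PySem.Str.len (fs.getD (i + 1) "") + 1 := by
  induction fs generalizing t i with
  | nil => simp at h
  | cons f rest ih =>
      cases i with
      | zero =>
          cases rest with
          | nil => simp at h
          | cons g r => simp [pvPrefix]
      | succ j =>
          simp only [pvPrefix, List.getD]
          exact ih _ j (by simpa using h)

theorem pvPrefix_mono (fs : List String) (t : Int) (i j : Nat) (hij : i ≤ j)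
    (hj : j < fs.length) :
    (pvPrefix fs t).getD i 0 ≤ (pvPrefix fs t).getD j 0 := by
  induction j with
  | zero =>
      have : i = 0 := Nat.le_zero.mp hij
      simp [this]
  | succ k ih =>
      rcases Nat.eq_or_lt_of_le hij with h | h
      · subst h; exact le_refl _
      · have hk : i ≤ k := by omega
        have h1 := ih hk (by omega)
        rw [pvPrefix_step fs t k hj]
        have hlen : 0 ≤ PySem.Str.len (fs.getD (k + 1) "") := by
          simp [PySem.Str.len_eq]
        omega

-- loopA characterization: if k is the least index with q ≤ P[k] (or no such index below n),
-- then starting from col with cpos = P[col], A's loop returns min k (n-1).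
theorem pvLoopA_eq (fs : List String) (q : Int) (k : Nat)
    (hklow : ∀ i < k, (pvPrefix fs 0).getD i 0 < q)
    (hkhit : k < fs.length → q ≤ (pvPrefix fs 0).getD k 0)
    (col : Nat) (cpos : Int)
    (hcol : col < fs.length) (hck : col ≤ k)
    (hcpos : cpos = (pvPrefix fs 0).getD col 0) :
    pvLoopA fs q col cpos = min k (fs.length - 1) := by
  revert hcol hck hcpos
  induction col, cpos using pvLoopA.induct fs q with
  | case1 col cpos h ih =>
      intro hcol hck hcpos
      obtain ⟨hq, hlt⟩ := h
      have hcolk : col < k := by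
        rcases Nat.eq_or_lt_of_le hck with he | hl
        · exfalso
          have h2 := hkhit (he ▸ hcol)
          rw [← he, ← hcpos] at h2
          omega
        · exact hl
      rw [pvLoopA, if_pos ⟨hq, hlt⟩]
      exact ih hlt (by omega)
        (by rw [hcpos, pvPrefix_step fs 0 col hlt])
  | case2 col cpos h =>
      intro hcol hck hcpos
      rw [pvLoopA, if_neg h]
      rw [not_and_or] at h
      by_cases hq : q > cpos
      · have hcend : col + 1 = fs.length := by
          rcases h with h | h
          · omega
          · omega
        omega
      · have hcolk : col = k := by
          rcases Nat.lt_or_ge col k with hl | hg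
          · exfalso
            have h2 := hklow col hl
            rw [← hcpos] at h2
            omega
          · omega
        omega

-- bsearch characterization: with the bisect_left invariants it returns the least index
-- with q ≤ P[i] (or P.length if none).
theorem pvBsearch_spec (P : List Int) (q : Int)
    (hmono : ∀ i j, i ≤ j → j < P.length → P.getD i 0 ≤ P.getD j 0)
    (lo hi : Nat)
    (hlh : lo ≤ hi) (hhn : hi ≤ P.length)
    (hlow : ∀ i < lo, P.getD i 0 < q)
    (hhigh : ∀ i, hi ≤ i → i < P.length → q ≤ P.getD i 0) :
    (∀ i < pvBsearch P q lo hi, P.getD i 0 < q) ∧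
    (pvBsearch P q lo hi < P.length → q ≤ P.getD (pvBsearch P q lo hi) 0) ∧
    pvBsearch P q lo hi ≤ P.length := by
  revert hlh hhn hlow hhigh
  induction lo, hi using pvBsearch.induct P q with
  | case1 lo hi hlt mid hcmp ih =>
      intro hlh hhn hlow hhigh
      have hmid : mid = (lo + hi) / 2 := rfl
      rw [pvBsearch, dif_pos hlt, if_pos hcmp]
      exact ih (by omega) hhn
        (fun i hi' => by
          rcases Nat.lt_or_ge i lo with hl | hg
          · exact hlow i hl
          · have h2 := hmono i mid (by omega) (by omega)
            omega)
        hhigh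
  | case2 lo hi hlt mid hcmp ih =>
      intro hlh hhn hlow hhigh
      have hmid : mid = (lo + hi) / 2 := rfl
      rw [pvBsearch, dif_pos hlt, if_neg hcmp]
      rw [not_lt] at hcmp
      exact ih (by omega) (by omega) hlow
        (fun i hi1 hi2 => le_trans hcmp (hmono mid i (by omega) hi2))
  | case3 lo hi hlt =>
      intro hlh hhn hlow hhigh
      rw [pvBsearch, dif_neg hlt]
      have : lo = hi := by omega
      exact ⟨hlow, fun h2 => hhigh lo (by omega) h2, by omega⟩

-- ===== VERDICT (by name: the statement is the Claim_ definition above) =====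
theorem get_field_by_line_position_spec : Claim_equal_get_field_by_line_position := by
  intro fields q _
  unfold Spec_get_field_by_line_position
  unfold get_field_by_line_position get_field_by_line_position_alt
  cases hfs : fields with
  | nil => simp
  | cons f rest =>
      rw [if_neg (by simp), if_neg (by simp)]
      set fs := f :: rest with hfsdef
      have hne : fs ≠ [] := by simp [hfsdef]
      have hn : 0 < fs.length := by simp [hfsdef]
      have hPlen : (pvPrefix fs 0).length = fs.length := pvPrefix_length fs 0
      obtain ⟨hklow, hkhit, hkle⟩ :=
        pvBsearch_spec (pvPrefix fs 0) q
          (fun i j hij hj => pvPrefix_mono fs 0 i j hij (by omega))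
          0 (pvPrefix fs 0).length
          (by omega) (le_refl _)
          (fun i hi => by omega)
          (fun i h1 h2 => by omega)
      have hA : pvLoopA fs q 0 (PySem.Str.len (fs.getD 0 "") + 1)
          = min (pvBsearch (pvPrefix fs 0) q 0 (pvPrefix fs 0).length) (fs.length - 1) := by
        apply pvLoopA_eq fs q _ hklow (fun hlt => hkhit (by omega)) 0 _ hn (Nat.zero_le _)
        rw [pvPrefix_zero fs 0 hne]; ring
      rw [hA]
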